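-- pv_equiv track=rewrite | github.com/981377660LMT/algorithm-study | 11_动态规划/dp分类/数位dp/结论/x乘以x二进制位1之和-bitCountSum.py | bit_count_sum
-- ===== SOURCE A (Python) =====
-- from typing import Tuple
--
-- mod = int(1e9 + 7)
--
-- def bit_count_sum(higher: int) -> Tuple[int, int]:
--     if higher == 0:
--         return 0, 0
--     if higher % 2:
--         a, b = bit_count_sum(higher - 1)
--         p = (higher - 1).bit_count()
--         a += (higher - 1) * p
--         b += p
--         return a % mod, b % mod
--     a, b = bit_count_sum(higher // 2)
--     return (a * 2 + a * 2 + b + (higher // 2) ** 2) % mod, (b * 2 + higher // 2) % mod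
-- ===== SOURCE B (Python) =====
-- mod = int(1e9 + 7)
--
-- def bit_count_sum(higher):
--     # Count per bit position: among k in [0, higher), bit i (value h = 2**i) is set
--     # in q = higher//(2h) full blocks of h numbers plus a partial run of rem numbers,
--     # giving both the popcount sum and the k-weighted sum in closed form per bit.
--     s1 = 0
--     s2 = 0
--     h = 1
--     while h < higher:
--         q = higher // (2 * h)
--         r = higher % (2 * h)
--         rem = r - h
--         if rem < 0:
--             rem = 0
--         s1 += 2 * h * h * (q * (q - 1) // 2) + q * (h * (h - 1) // 2 + h * h) \
--               + rem * (2 * h * q + h) + rem * (rem - 1) // 2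
--         s2 += q * h + rem
--         h = 2 * h
--     return s1 % mod, s2 % mod
-- ===== Notes on version B (the rewrite author's own statement) =====
-- stated objective: alternative
-- what changed: Replaced the halving/subtract-one divide-and-conquer recursion by a loop over bit positions that adds a closed-form block count and block-weighted sum per bit, taking the modulus once at the end.
import Mathlib
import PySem

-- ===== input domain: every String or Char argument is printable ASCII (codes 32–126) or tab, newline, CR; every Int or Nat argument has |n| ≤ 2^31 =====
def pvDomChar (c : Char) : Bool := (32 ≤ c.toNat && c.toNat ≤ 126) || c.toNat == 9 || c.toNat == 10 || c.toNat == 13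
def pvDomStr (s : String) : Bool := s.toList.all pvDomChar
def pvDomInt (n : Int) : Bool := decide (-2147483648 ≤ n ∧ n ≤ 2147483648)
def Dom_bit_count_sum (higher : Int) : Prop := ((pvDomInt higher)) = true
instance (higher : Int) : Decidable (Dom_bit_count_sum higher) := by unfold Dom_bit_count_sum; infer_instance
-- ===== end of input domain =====

-- B replaces A's halving divide-and-conquer recursion by a per-bit-position loop
-- with a closed-form block count per bit (objective: alternative algorithm).

-- mod = int(1e9 + 7)
def pvMod : Int := 1000000007

-- ===== PORT A =====
-- Literal port of A's recursion. The 'higher < 0' guard only makes the Lean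
-- function total: there the Python recurses forever (RecursionError), outside Pre_.
def bit_count_sum (higher : Int) : Int × Int :=
  if h0 : higher = 0 then (0, 0)
  else if hneg : higher < 0 then (0, 0)
  else if PySem.Int.mod higher 2 ≠ 0 then
    let ab := bit_count_sum (higher - 1)
    let p : Int := PySem.Int.bitCount (higher - 1)
    (PySem.Int.mod (ab.1 + (higher - 1) * p) pvMod, PySem.Int.mod (ab.2 + p) pvMod)
  else
    let ab := bit_count_sum (PySem.Int.floordiv higher 2)
    (PySem.Int.mod (ab.1 * 2 + ab.1 * 2 + ab.2 + (PySem.Int.floordiv higher 2) ^ 2) pvMod,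
     PySem.Int.mod (ab.2 * 2 + PySem.Int.floordiv higher 2) pvMod)
termination_by higher.toNat
decreasing_by
  · omega
  · have h2 : PySem.Int.floordiv higher 2 = higher / 2 :=
      PySem.Int.floordiv_eq_ediv_of_pos (by omega)
    rw [h2]; omega

-- ===== PORT B =====
-- Literal port of B's while-loop over bit values h = 1, 2, 4, …; the fuel only
-- bounds the number of doublings (h doubles from 1, so higher.toNat + 1 rounds
-- always suffice and the fuel-0 branch is never reached from bit_count_sum_alt).
def pvAltGo (fuel : Nat) (higher h s1 s2 : Int) : Int × Int :=
  match fuel with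
  | 0 => (PySem.Int.mod s1 pvMod, PySem.Int.mod s2 pvMod)
  | fuel + 1 =>
    if h < higher then
      let q := PySem.Int.floordiv higher (2 * h)
      let r := PySem.Int.mod higher (2 * h)
      let rem := if r - h < 0 then 0 else r - h
      pvAltGo fuel higher (2 * h)
        (s1 + (2 * h * h * PySem.Int.floordiv (q * (q - 1)) 2
               + q * (PySem.Int.floordiv (h * (h - 1)) 2 + h * h)
               + rem * (2 * h * q + h) + PySem.Int.floordiv (rem * (rem - 1)) 2))
        (s2 + (q * h + rem))
    else (PySem.Int.mod s1 pvMod, PySem.Int.mod s2 pvMod)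

def bit_count_sum_alt (higher : Int) : Int × Int :=
  pvAltGo (higher.toNat + 1) higher 1 0 0

-- ===== PRECONDITION & SPEC =====
-- Pre_ excludes negative higher: there the Python A recurses without a base case and raises RecursionError.
def Pre_bit_count_sum (higher : Int) : Prop := 0 ≤ higher
instance (higher : Int) : Decidable (Pre_bit_count_sum higher) := by unfold Pre_bit_count_sum; infer_instance
def pvWitness_bit_count_sum : Int := (6)

def Spec_bit_count_sum (higher : Int) (out : Int × Int) : Prop := out = bit_count_sum_alt higher
instance (higher : Int) (out : Int × Int) : Decidable (Spec_bit_count_sum higher out) := by unfold Spec_bit_count_sum; infer_instance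

-- ===== CLAIM (what is proved, stated in full; the proofs are below) =====
def Claim_equal_bit_count_sum : Prop := ∀ (higher : Int), Dom_bit_count_sum higher → Pre_bit_count_sum higher → Spec_bit_count_sum higher (bit_count_sum higher)

-- ===== LEMMAS AND PROOFS =====

-- popcount on Nat, and the two exact sums both programs compute (mod pvMod)
def pvPC (n : Nat) : Int := PySem.Int.bitCount (n : Int)
def pvS1 (n : Nat) : Int := ∑ k ∈ Finset.range n, (k : Int) * pvPC k
def pvS2 (n : Nat) : Int := ∑ k ∈ Finset.range n, pvPC k

lemma pvPC_even (m : Nat) : pvPC (2 * m) = pvPC m := by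
  rcases Nat.eq_zero_or_pos m with h | h
  · simp [h, pvPC]
  · unfold pvPC
    have hb := PySem.Int.bitCount_natCast (m := 2 * m) (by omega)
    have h1 : 2 * m % 2 = 0 := by omega
    have h2 : 2 * m / 2 = m := by omega
    rw [h1, h2, Nat.zero_add] at hb
    exact_mod_cast hb

lemma pvPC_odd (m : Nat) : pvPC (2 * m + 1) = pvPC m + 1 := by
  unfold pvPC
  have hb := PySem.Int.bitCount_natCast (m := 2 * m + 1) (by omega)
  have h1 : (2 * m + 1) % 2 = 1 := by omega
  have h2 : (2 * m + 1) / 2 = m := by omega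
  rw [h1, h2] at hb
  rw [hb]; push_cast; ring

lemma pvS2_even (m : Nat) : pvS2 (2 * m) = 2 * pvS2 m + m := by
  induction m with
  | zero => simp [pvS2]
  | succ m ih =>
    have e : 2 * (m + 1) = (2 * m + 1) + 1 := by ring
    rw [e]
    unfold pvS2 at *
    rw [Finset.sum_range_succ, Finset.sum_range_succ, Finset.sum_range_succ, ih,
        pvPC_even, pvPC_odd]
    push_cast; ring

lemma pvS1_even (m : Nat) : pvS1 (2 * m) = 4 * pvS1 m + pvS2 m + (m : Int) ^ 2 := by
  induction m with
  | zero => simp [pvS1, pvS2]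
  | succ m ih =>
    have e : 2 * (m + 1) = (2 * m + 1) + 1 := by ring
    rw [e]
    unfold pvS1 pvS2 at *
    rw [Finset.sum_range_succ, Finset.sum_range_succ, Finset.sum_range_succ,
        Finset.sum_range_succ, ih, pvPC_even, pvPC_odd]
    push_cast; ring

lemma pvmd (a b : Int) (hb : 0 < b) : PySem.Int.mod a b = a % b := by
  simp only [PySem.Int.mod]
  rw [Int.fmod_eq_emod]
  simp [Or.inl hb.le]

lemma pvMod_eq (a : Int) : PySem.Int.mod a pvMod = a % pvMod := pvmd a pvMod (by norm_num [pvMod])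

lemma pvModA (A B c : Int) :
    (A % pvMod * 2 + A % pvMod * 2 + B % pvMod + c) % pvMod = (4 * A + B + c) % pvMod := by
  simp only [pvMod]; omega

lemma pvModB (B c : Int) : (B % pvMod * 2 + c) % pvMod = (2 * B + c) % pvMod := by
  simp only [pvMod]; omega

lemma pvModAdd (A c : Int) : (A % pvMod + c) % pvMod = (A + c) % pvMod := by
  simp only [pvMod]; omega

lemma pvS1_succ (n : Nat) : pvS1 (n + 1) = pvS1 n + (n : Int) * pvPC n := by
  unfold pvS1; rw [Finset.sum_range_succ]

lemma pvS2_succ (n : Nat) : pvS2 (n + 1) = pvS2 n + pvPC n := by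
  unfold pvS2; rw [Finset.sum_range_succ]

-- A computes (pvS1 n % pvMod, pvS2 n % pvMod)
lemma pvA_eq (n : Nat) : bit_count_sum (n : Int) = (pvS1 n % pvMod, pvS2 n % pvMod) := by
  induction n using Nat.strong_induction_on with
  | _ n ih =>
    rcases Nat.eq_zero_or_pos n with h0 | hpos
    · subst h0; simp [bit_count_sum, pvS1, pvS2]
    · rw [bit_count_sum]
      have hne : (n : Int) ≠ 0 := by exact_mod_cast Nat.pos_iff_ne_zero.mp hpos
      have hnneg : ¬ ((n : Int) < 0) := by omega
      rw [dif_neg hne, dif_neg hnneg]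
      have hmod : PySem.Int.mod (n : Int) 2 = ((n % 2 : Nat) : Int) := PySem.Int.mod_natCast n 2
      rcases Nat.even_or_odd n with ⟨m, hm⟩ | ⟨m, hm⟩
      · -- even branch
        have hm' : n = 2 * m := by omega
        have hm2 : n % 2 = 0 := by omega
        rw [if_neg (by rw [hmod, hm2]; simp)]
        have hfd : PySem.Int.floordiv (n : Int) 2 = ((m : Nat) : Int) := by
          rw [PySem.Int.floordiv_eq_ediv_of_pos (by omega)]; omega
        rw [hfd, ih m (by omega)]
        simp only [pvMod_eq]
        subst hm'
        rw [pvS1_even, pvS2_even, pvModA, pvModB]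
      · -- odd branch
        have hm2 : n % 2 = 1 := by omega
        rw [if_pos (by rw [hmod, hm2]; simp)]
        have hsub : (n : Int) - 1 = ((n - 1 : Nat) : Int) := by omega
        rw [hsub, ih (n - 1) (by omega)]
        simp only [pvMod_eq]
        have hstep1 : pvS1 n = pvS1 (n - 1) + ((n - 1 : Nat) : Int) * pvPC (n - 1) := by
          have : n = (n - 1) + 1 := by omega
          rw [this]; unfold pvS1; rw [Finset.sum_range_succ]; simp
        have hstep2 : pvS2 n = pvS2 (n - 1) + pvPC (n - 1) := by
          have : n = (n - 1) + 1 := by omega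
          rw [this]; unfold pvS2; rw [Finset.sum_range_succ]; simp
        rw [hstep1, hstep2]
        simp only [pvPC]
        rw [pvModAdd, pvModAdd]

-- ===== B side: per-bit closed forms =====

def pvTri (x : Int) : Int := x * (x - 1) / 2
def pvCnt (n h : Int) : Int := n / (2 * h) * h + max 0 (n % (2 * h) - h)
def pvW (n h : Int) : Int :=
  2 * h * h * pvTri (n / (2 * h)) + (n / (2 * h)) * (pvTri h + h * h)
    + max 0 (n % (2 * h) - h) * (2 * h * (n / (2 * h)) + h)
    + pvTri (max 0 (n % (2 * h) - h))

lemma pvTri_succ (x : Int) : pvTri (x + 1) = pvTri x + x := by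
  unfold pvTri
  have h : (x + 1) * (x + 1 - 1) = x * (x - 1) + x * 2 := by ring
  rw [h, Int.add_mul_ediv_right _ _ (by norm_num : (2 : Int) ≠ 0)]

lemma pvTri_zero : pvTri 0 = 0 := by unfold pvTri; norm_num

lemma pvCnt_succ (n h : Int) (hh : 0 < h) :
    pvCnt (n + 1) h = pvCnt n h + (if h ≤ n % (2 * h) then 1 else 0) := by
  have hqr : 2 * h * (n / (2 * h)) + n % (2 * h) = n := Int.mul_ediv_add_emod n (2 * h)
  have hr0 : 0 ≤ n % (2 * h) := Int.emod_nonneg n (by omega)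
  have hrP : n % (2 * h) < 2 * h := Int.emod_lt_of_pos n (by omega)
  set q := n / (2 * h) with hq
  set r := n % (2 * h) with hr
  by_cases hcase : r + 1 < 2 * h
  · have hn1 : n + 1 = (r + 1) + 2 * h * q := by omega
    have hq1 : (n + 1) / (2 * h) = q := by
      rw [hn1, Int.add_mul_ediv_left _ _ (by omega : 2 * h ≠ 0),
          Int.ediv_eq_zero_of_lt (by omega) hcase, zero_add]
    have hr1 : (n + 1) % (2 * h) = r + 1 := by
      rw [hn1, Int.add_mul_emod_self_left, Int.emod_eq_of_lt (by omega) hcase]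
    unfold pvCnt
    rw [hq1, hr1, ← hq, ← hr]
    by_cases hbit : h ≤ r
    · rw [if_pos hbit, show max 0 (r + 1 - h) = (r - h) + 1 by omega,
          show max 0 (r - h) = r - h by omega]
      ring
    · rw [if_neg hbit, show max 0 (r + 1 - h) = 0 by omega,
          show max 0 (r - h) = 0 by omega]
      ring
  · have hr2 : r = 2 * h - 1 := by omega
    have hn1 : n + 1 = 0 + 2 * h * (q + 1) := by
      have hd : 2 * h * (q + 1) = 2 * h * q + 2 * h := by ring
      omega
    have hq1 : (n + 1) / (2 * h) = q + 1 := by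
      rw [hn1, Int.add_mul_ediv_left _ _ (by omega : 2 * h ≠ 0)]; simp
    have hr1 : (n + 1) % (2 * h) = 0 := by
      rw [hn1, Int.add_mul_emod_self_left]; simp
    unfold pvCnt
    rw [hq1, hr1, ← hq, ← hr, if_pos (by omega : h ≤ r),
        show max 0 ((0 : Int) - h) = 0 by omega, show max 0 (r - h) = h - 1 by omega]
    ring

lemma pvW_succ (n h : Int) (hh : 0 < h) :
    pvW (n + 1) h = pvW n h + (if h ≤ n % (2 * h) then n else 0) := by
  have hqr : 2 * h * (n / (2 * h)) + n % (2 * h) = n := Int.mul_ediv_add_emod n (2 * h)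
  have hr0 : 0 ≤ n % (2 * h) := Int.emod_nonneg n (by omega)
  have hrP : n % (2 * h) < 2 * h := Int.emod_lt_of_pos n (by omega)
  set q := n / (2 * h) with hq
  set r := n % (2 * h) with hr
  by_cases hcase : r + 1 < 2 * h
  · have hn1 : n + 1 = (r + 1) + 2 * h * q := by omega
    have hq1 : (n + 1) / (2 * h) = q := by
      rw [hn1, Int.add_mul_ediv_left _ _ (by omega : 2 * h ≠ 0),
          Int.ediv_eq_zero_of_lt (by omega) hcase, zero_add]
    have hr1 : (n + 1) % (2 * h) = r + 1 := by
      rw [hn1, Int.add_mul_emod_self_left, Int.emod_eq_of_lt (by omega) hcase]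
    unfold pvW
    rw [hq1, hr1, ← hq, ← hr]
    by_cases hbit : h ≤ r
    · rw [if_pos hbit, show max 0 (r + 1 - h) = (r - h) + 1 by omega,
          show max 0 (r - h) = r - h by omega, pvTri_succ (r - h)]
      linear_combination hqr
    · rw [if_neg hbit, show max 0 (r + 1 - h) = 0 by omega,
          show max 0 (r - h) = 0 by omega]
      ring
  · have hr2 : r = 2 * h - 1 := by omega
    have hn1 : n + 1 = 0 + 2 * h * (q + 1) := by
      have hd : 2 * h * (q + 1) = 2 * h * q + 2 * h := by ring
      omega
    have hq1 : (n + 1) / (2 * h) = q + 1 := by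
      rw [hn1, Int.add_mul_ediv_left _ _ (by omega : 2 * h ≠ 0)]; simp
    have hr1 : (n + 1) % (2 * h) = 0 := by
      rw [hn1, Int.add_mul_emod_self_left]; simp
    have hth : pvTri h = pvTri (h - 1) + (h - 1) := by
      have := pvTri_succ (h - 1)
      rw [show h - 1 + 1 = h by omega] at this
      rw [this]
    unfold pvW
    rw [hq1, hr1, ← hq, ← hr, if_pos (by omega : h ≤ r),
        show max 0 ((0 : Int) - h) = 0 by omega, show max 0 (r - h) = h - 1 by omega,
        pvTri_succ q, pvTri_zero, hth]
    rw [hr2] at hqr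
    linear_combination hqr

lemma pvCnt_vanish (n h : Int) (hh : 0 < h) (hn0 : 0 ≤ n) (hnh : n ≤ h) : pvCnt n h = 0 := by
  unfold pvCnt
  rw [Int.ediv_eq_zero_of_lt hn0 (by omega), Int.emod_eq_of_lt hn0 (by omega)]
  omega

lemma pvW_vanish (n h : Int) (hh : 0 < h) (hn0 : 0 ≤ n) (hnh : n ≤ h) : pvW n h = 0 := by
  unfold pvW
  rw [Int.ediv_eq_zero_of_lt hn0 (by omega), Int.emod_eq_of_lt hn0 (by omega),
      show max 0 (n - h) = 0 by omega, pvTri_zero]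
  ring

-- popcount as a sum of bit indicators
lemma pvBitCond (M j : Nat) : ((2 : Int) ^ j ≤ (M : Int) % 2 ^ (j + 1)) ↔ (2 ^ j ≤ M % 2 ^ (j + 1)) := by
  rw [show ((M : Int) % 2 ^ (j + 1)) = ((M % 2 ^ (j + 1) : Nat) : Int) by push_cast; ring]
  constructor <;> intro hx <;> exact_mod_cast hx

lemma pvPcBits : ∀ (L N : Nat), N < 2 ^ L →
    ((PySem.Int.bitCount (N : Int) : Nat) : Int)
      = ∑ i ∈ Finset.range L, (if (2 : Int) ^ i ≤ (N : Int) % 2 ^ (i + 1) then 1 else 0) := by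
  intro L
  induction L with
  | zero =>
    intro N hN
    have : N = 0 := by omega
    subst this
    simp
  | succ L ih =>
    intro N hN
    rcases Nat.eq_zero_or_pos N with h0 | hpos
    · subst h0
      rw [Finset.sum_eq_zero]
      · simp
      · intro i _
        rw [if_neg]
        simp only [Nat.cast_zero, Int.zero_emod, not_le]
        positivity
    · have hb := PySem.Int.bitCount_natCast (m := N) hpos
      have hN2 : N / 2 < 2 ^ L := by
        have h2 : 2 ^ (L + 1) = 2 * 2 ^ L := by rw [pow_succ]; ring
        omega
      rw [Finset.sum_range_succ']
      have hf0 : (if (2 : Int) ^ 0 ≤ (N : Int) % 2 ^ (0 + 1) then (1 : Int) else 0)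
          = ((N % 2 : Nat) : Int) := by
        rw [pow_zero, show ((N : Int) % 2 ^ (0 + 1)) = ((N % 2 : Nat) : Int) by push_cast; norm_num]
        rcases Nat.mod_two_eq_zero_or_one N with h | h <;> rw [h] <;> norm_num
      have hstep : ∀ i : Nat,
          (if (2 : Int) ^ (i + 1) ≤ (N : Int) % 2 ^ (i + 1 + 1) then (1 : Int) else 0)
            = (if (2 : Int) ^ i ≤ ((N / 2 : Nat) : Int) % 2 ^ (i + 1) then 1 else 0) := by
        intro i
        have hmd : (N / 2) % 2 ^ (i + 1) = N % 2 ^ (i + 2) / 2 := by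
          rw [← Nat.mod_mul_right_div_self N 2 (2 ^ (i + 1))]
          congr 2
          rw [pow_succ]; ring
        have cond : (2 ^ (i + 1) ≤ N % 2 ^ (i + 2)) ↔ (2 ^ i ≤ (N / 2) % 2 ^ (i + 1)) := by
          rw [hmd]
          have h2 : 2 ^ (i + 1) = 2 * 2 ^ i := by rw [pow_succ]; ring
          generalize N % 2 ^ (i + 2) = x
          omega
        have cond2 : ((2 : Int) ^ (i + 1) ≤ (N : Int) % 2 ^ (i + 1 + 1))
            ↔ ((2 : Int) ^ i ≤ ((N / 2 : Nat) : Int) % 2 ^ (i + 1)) :=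
          (pvBitCond N (i + 1)).trans (cond.trans (pvBitCond (N / 2) i).symm)
        rw [if_congr cond2 rfl rfl]
      simp only [hstep]
      rw [← ih (N / 2) hN2, hb, hf0]
      push_cast
      ring

-- the per-bit closed forms sum to pvS1 / pvS2
lemma pvSums_eq (L : Nat) : ∀ (N : Nat), N < 2 ^ L →
    (∑ i ∈ Finset.range L, pvW (N : Int) ((2 : Int) ^ i)) = pvS1 N ∧
    (∑ i ∈ Finset.range L, pvCnt (N : Int) ((2 : Int) ^ i)) = pvS2 N := by
  intro N
  induction N with
  | zero =>
    intro _
    simp only [Nat.cast_zero]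
    constructor
    · rw [Finset.sum_eq_zero (fun i _ => pvW_vanish 0 ((2:Int) ^ i) (by positivity) le_rfl (by positivity))]
      simp [pvS1]
    · rw [Finset.sum_eq_zero (fun i _ => pvCnt_vanish 0 ((2:Int) ^ i) (by positivity) le_rfl (by positivity))]
      simp [pvS2]
  | succ N ih =>
    intro hN
    obtain ⟨ih1, ih2⟩ := ih (by omega)
    have hcast : ((N + 1 : Nat) : Int) = (N : Int) + 1 := by push_cast; ring
    have hcond : ∀ i : Nat, ((2 : Int) ^ i ≤ (N : Int) % (2 * 2 ^ i)) ↔ ((2 : Int) ^ i ≤ (N : Int) % 2 ^ (i + 1)) := by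
      intro i
      rw [show (2 * (2 : Int) ^ i) = 2 ^ (i + 1) by rw [pow_succ]; ring]
    have hpc : pvPC N = ∑ i ∈ Finset.range L, (if (2 : Int) ^ i ≤ (N : Int) % 2 ^ (i + 1) then 1 else 0) :=
      pvPcBits L N (by omega)
    constructor
    · rw [hcast,
          Finset.sum_congr rfl (fun i _ => pvW_succ (N : Int) ((2 : Int) ^ i) (by positivity)),
          Finset.sum_add_distrib, ih1]
      have hsum : (∑ i ∈ Finset.range L, (if (2 : Int) ^ i ≤ (N : Int) % (2 * 2 ^ i) then (N : Int) else 0))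
          = (N : Int) * ∑ i ∈ Finset.range L, (if (2 : Int) ^ i ≤ (N : Int) % 2 ^ (i + 1) then 1 else 0) := by
        rw [Finset.mul_sum]
        refine Finset.sum_congr rfl (fun i _ => ?_)
        rw [if_congr (hcond i) rfl rfl]
        split_ifs <;> ring
      rw [hsum, ← hpc, pvS1_succ]
    · rw [hcast,
          Finset.sum_congr rfl (fun i _ => pvCnt_succ (N : Int) ((2 : Int) ^ i) (by positivity)),
          Finset.sum_add_distrib, ih2]
      have hsum : (∑ i ∈ Finset.range L, (if (2 : Int) ^ i ≤ (N : Int) % (2 * 2 ^ i) then (1 : Int) else 0))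
          = ∑ i ∈ Finset.range L, (if (2 : Int) ^ i ≤ (N : Int) % 2 ^ (i + 1) then 1 else 0) :=
        Finset.sum_congr rfl (fun i _ => by rw [if_congr (hcond i) rfl rfl])
      rw [hsum, ← hpc, pvS2_succ]

-- the loop accumulates exactly the per-bit closed forms for h, 2h, 4h, …
lemma pvGo_eq : ∀ (fuel : Nat) (n h s1 s2 : Int), 0 < h → 0 ≤ n → n ≤ h * 2 ^ fuel →
    pvAltGo fuel n h s1 s2 =
      ((s1 + ∑ i ∈ Finset.range fuel, pvW n (h * 2 ^ i)) % pvMod,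
       (s2 + ∑ i ∈ Finset.range fuel, pvCnt n (h * 2 ^ i)) % pvMod) := by
  intro fuel
  induction fuel with
  | zero =>
    intro n h s1 s2 hh hn hfuel
    simp [pvAltGo, pvMod_eq]
  | succ fuel ih =>
    intro n h s1 s2 hh hn hfuel
    rw [pvAltGo]
    by_cases hlt : h < n
    · rw [if_pos hlt]
      simp only [pvmd _ _ (by omega : (0 : Int) < 2 * h),
                 PySem.Int.floordiv_eq_ediv_of_pos (by omega : (0 : Int) < 2 * h),
                 PySem.Int.floordiv_eq_ediv_of_pos (by norm_num : (0 : Int) < 2)]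
      rw [ih n (2 * h) _ _ (by omega) hn (by rw [show 2 * h * 2 ^ fuel = h * 2 ^ (fuel + 1) by rw [pow_succ]; ring]; exact hfuel)]
      have hrem : (if n % (2 * h) - h < 0 then (0 : Int) else n % (2 * h) - h) = max 0 (n % (2 * h) - h) := by
        split_ifs <;> omega
      rw [hrem]
      have hW : ∑ i ∈ Finset.range (fuel + 1), pvW n (h * 2 ^ i)
          = pvW n h + ∑ i ∈ Finset.range fuel, pvW n (2 * h * 2 ^ i) := by
        rw [Finset.sum_range_succ', Finset.sum_congr rfl (fun i _ => by rw [show h * 2 ^ (i + 1) = 2 * h * 2 ^ i by rw [pow_succ]; ring])]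
        rw [show h * 2 ^ 0 = h by ring]
        ring
      have hC : ∑ i ∈ Finset.range (fuel + 1), pvCnt n (h * 2 ^ i)
          = pvCnt n h + ∑ i ∈ Finset.range fuel, pvCnt n (2 * h * 2 ^ i) := by
        rw [Finset.sum_range_succ', Finset.sum_congr rfl (fun i _ => by rw [show h * 2 ^ (i + 1) = 2 * h * 2 ^ i by rw [pow_succ]; ring])]
        rw [show h * 2 ^ 0 = h by ring]
        ring
      rw [hW, hC, Prod.mk.injEq]
      refine ⟨?_, ?_⟩ <;> · congr 1; simp only [pvW, pvCnt, pvTri]; ring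
    · rw [if_neg hlt]
      have hzero : ∀ i ∈ Finset.range (fuel + 1), pvW n (h * 2 ^ i) = 0 := by
        intro i _
        refine pvW_vanish n _ (by positivity) hn ?_
        calc n ≤ h := by omega
          _ = h * 1 := by ring
          _ ≤ h * 2 ^ i := by
              refine mul_le_mul_of_nonneg_left ?_ hh.le
              exact one_le_pow₀ (by norm_num)
      have hzero' : ∀ i ∈ Finset.range (fuel + 1), pvCnt n (h * 2 ^ i) = 0 := by
        intro i _
        refine pvCnt_vanish n _ (by positivity) hn ?_
        calc n ≤ h := by omega
          _ = h * 1 := by ring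
          _ ≤ h * 2 ^ i := by
              refine mul_le_mul_of_nonneg_left ?_ hh.le
              exact one_le_pow₀ (by norm_num)
      rw [Finset.sum_eq_zero hzero, Finset.sum_eq_zero hzero']
      simp [pvMod_eq]

-- B computes (pvS1 n % pvMod, pvS2 n % pvMod)
lemma pvB_eq (n : Nat) : bit_count_sum_alt (n : Int) = (pvS1 n % pvMod, pvS2 n % pvMod) := by
  unfold bit_count_sum_alt
  have hN : n < 2 ^ (n + 1) := by
    calc n < 2 ^ n := Nat.lt_two_pow_self
      _ ≤ 2 ^ (n + 1) := Nat.pow_le_pow_right (by norm_num) (by omega)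
  have ht : ((n : Int).toNat) = n := Int.toNat_natCast n
  rw [ht, pvGo_eq (n + 1) (n : Int) 1 0 0 one_pos (by positivity)
        (by rw [one_mul]; exact_mod_cast hN.le)]
  obtain ⟨h1, h2⟩ := pvSums_eq (n + 1) n hN
  simp only [one_mul] at *
  rw [h1, h2]
  norm_num

-- ===== VERDICT (by name: the statement is the Claim_ definition above) =====
theorem bit_count_sum_spec : Claim_equal_bit_count_sum := by
  intro higher _ hpre
  unfold Spec_bit_count_sum
  obtain ⟨n, rfl⟩ : ∃ n : Nat, higher = (n : Int) := ⟨higher.toNat, (Int.toNat_of_nonneg hpre).symm⟩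
  rw [pvA_eq, pvB_eq]
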